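-- pv_equiv track=rewrite | github.com/akhandsingh17/assignments | codingexercise/GetClusters.py | GetClusters
-- ===== SOURCE A (Python) =====
-- def Getlist_data(lst,tmp,rev_dict):
--
--     if len(lst)==0:
--         return
--
--     for l in lst:
--         tmp.append(l)
--         if l in rev_dict.keys():
--             Getlist_data(rev_dict[l],tmp,rev_dict)
--
-- def GetClusters(ary):
--
--     dict={}
--
--     for tup in ary:
--         dict[tup[0]]=tup[1]
--
--     rev_dict={}
--
--     for key,val in dict.items():
--         if val in rev_dict.keys():
--             rev_dict[val].append(key)
--         else:
--             tmp=[]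
--             tmp.append(key)
--             rev_dict[val]=tmp
--
--     cl_lst=[]
--     for key,val in rev_dict.items():
--         if key not in dict.keys():
--             cl_lst.append(key)
--
--     fnl_lst={}
--     for key in cl_lst:
--
--         tmp=[]
--         tmp.append(key)
--         if key in rev_dict.keys():
--             Getlist_data(rev_dict[key],tmp,rev_dict)
--
--         fnl_lst[key]=sorted(set(tmp))
--     return fnl_lst
-- ===== SOURCE B (Python) =====
-- def GetClusters(ary):
--     # Same grouping, but the recursive collector is replaced by an explicit
--     # stack machine (stack of pending child lists, popped front-first).
--     fwd = dict(ary)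
--     rev = {}
--     for k, v in fwd.items():
--         rev.setdefault(v, []).append(k)
--     out = {}
--     for root in rev:
--         if root in fwd:
--             continue
--         tmp = [root]
--         kids = rev.get(root)
--         stack = [list(kids)] if kids else []
--         while stack:
--             top = stack[-1]
--             node = top.pop(0)
--             if not top:
--                 stack.pop()
--             tmp.append(node)
--             kids = rev.get(node)
--             if kids:
--                 stack.append(list(kids))
--         out[root] = sorted(set(tmp))
--     return out
-- ===== Notes on version B (the rewrite author's own statement) =====
-- stated objective: alternative
-- what changed: The recursive collector Getlist_data is replaced by an explicit iterative stack machine (a while-loop popping pending child lists), the forward dict is built with dict(ary) and the reverse map with setdefault, and root filtering is merged into a single pass over the reverse map's keys.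
import Mathlib
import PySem

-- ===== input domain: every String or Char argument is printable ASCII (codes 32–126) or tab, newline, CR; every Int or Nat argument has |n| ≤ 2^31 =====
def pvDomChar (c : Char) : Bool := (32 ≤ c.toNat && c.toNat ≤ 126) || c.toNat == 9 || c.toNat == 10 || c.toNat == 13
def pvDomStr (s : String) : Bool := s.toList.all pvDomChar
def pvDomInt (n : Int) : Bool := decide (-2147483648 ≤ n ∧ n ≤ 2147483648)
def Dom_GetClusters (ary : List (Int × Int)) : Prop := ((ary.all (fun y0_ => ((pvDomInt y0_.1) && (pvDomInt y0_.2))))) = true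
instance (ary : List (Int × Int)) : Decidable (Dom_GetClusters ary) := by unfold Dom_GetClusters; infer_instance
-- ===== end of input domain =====

-- B replaces the recursive cluster collector by an explicit stack-machine loop (same
-- grouping pipeline otherwise); the return values are proved equal on the whole domain.


-- ===== PORT A =====
-- Getlist_data(lst, tmp, rev_dict): the recursion is guarded by a fuel counter so the
-- Lean definition is total; it spends one unit per element it appends and returns the
-- amount spent; the top-level call supplies ample fuel (ary.length + 1), so the guard
-- branches are never taken on the runs the Python performs.
def Getlist_data (fuel : Nat) (lst : List Int) (rev : PySem.Dict Int (List Int))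
    (tmp : List Int) : List Int × Nat :=
  match fuel, lst with
  | _, [] => (tmp, 0)
  | 0, _ :: _ => (tmp, 0)
  | f + 1, l :: ls =>
    let tmp1 := tmp ++ [l]
    let cr := if rev.contains l then Getlist_data f (rev.getD l []) rev tmp1
              else (tmp1, 0)
    let sr := Getlist_data (f - cr.2) ls rev cr.1
    (sr.1, 1 + cr.2 + sr.2)
termination_by fuel
decreasing_by · omega
              · omega


-- dict / rev_dict / cl_lst / fnl_lst loops of GetClusters, line for line
def GetClusters (ary : List (Int × Int)) : List (Int × List Int) :=
  let d := ary.foldl (fun d t => d.insert t.1 t.2)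
    (PySem.Dict.empty : PySem.Dict Int Int)
  let rev := d.items.foldl (fun r kv =>
      if r.contains kv.2 then r.modify kv.2 [] (fun l => l ++ [kv.1])
      else r.insert kv.2 [kv.1])
    (PySem.Dict.empty : PySem.Dict Int (List Int))
  let cl := rev.items.foldl (fun acc kv =>
      if d.contains kv.1 then acc else acc ++ [kv.1]) ([] : List Int)
  let fnl := cl.foldl (fun fl key =>
      let tmp0 : List Int := [key]
      let tmp := if rev.contains key
                 then (Getlist_data (ary.length + 1) (rev.getD key []) rev tmp0).1
                 else tmp0
      fl.insert key (PySem.List.sorted (PySem.Set.ofList tmp) (fun x => x) false))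
    (PySem.Dict.empty : PySem.Dict Int (List Int))
  fnl.items


-- ===== PORT B =====
-- while stack: top = stack[-1]; node = top.pop(0); if not top: stack.pop();
--   tmp.append(node); kids = rev.get(node); if kids: stack.append(list(kids))
-- (list head = Python's stack top; fuel spends one unit per loop iteration and is ample
-- at ary.length + 1; the guard branches are never taken on the runs the Python performs)
def clusterLoop (fuel : Nat) (stack : List (List Int)) (rev : PySem.Dict Int (List Int))
    (tmp : List Int) : List Int :=
  match fuel, stack with
  | _, [] => tmp
  | 0, _ :: _ => tmp
  | f + 1, top :: rest =>
    match top with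
    | [] => clusterLoop f rest rev tmp
    | node :: top' =>
      let rest1 := if top'.isEmpty then rest else top' :: rest
      let tmp1 := tmp ++ [node]
      let stack' := match rev.get? node with
        | some (k :: ks) => (k :: ks) :: rest1
        | _ => rest1
      clusterLoop f stack' rev tmp1
termination_by fuel


def GetClusters_alt (ary : List (Int × Int)) : List (Int × List Int) :=
  let fwd := PySem.Dict.ofList ary
  let rev := fwd.items.foldl (fun r kv =>
      r.modify kv.2 [] (fun l => l ++ [kv.1]))
    (PySem.Dict.empty : PySem.Dict Int (List Int))
  let out := rev.keys.foldl (fun o root =>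
      if fwd.contains root then o
      else
        let stack0 : List (List Int) := match rev.get? root with
          | some (k :: ks) => [k :: ks]
          | _ => []
        let tmp := clusterLoop (ary.length + 1) stack0 rev [root]
        o.insert root (PySem.List.sorted (PySem.Set.ofList tmp) (fun x => x) false))
    (PySem.Dict.empty : PySem.Dict Int (List Int))
  out.items


-- ===== PRECONDITION & SPEC =====
def Spec_GetClusters (ary : List (Int × Int)) (out : List (Int × List Int)) : Prop := out = GetClusters_alt ary
instance (ary : List (Int × Int)) (out : List (Int × List Int)) : Decidable (Spec_GetClusters ary out) := by unfold Spec_GetClusters; infer_instance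

-- ===== CLAIM (what is proved, stated in full; the proofs are below) =====
def Claim_equal_GetClusters : Prop := ∀ (ary : List (Int × Int)), Dom_GetClusters ary → Spec_GetClusters ary (GetClusters ary)

-- ===== LEMMAS AND PROOFS =====

lemma clusterLoop_zero (stack : List (List Int)) (rev : PySem.Dict Int (List Int))
    (tmp : List Int) : clusterLoop 0 stack rev tmp = tmp := by
  cases stack <;> simp [clusterLoop]

lemma Getlist_data_nil (f : Nat) (rev : PySem.Dict Int (List Int)) (tmp : List Int) :
    Getlist_data f [] rev tmp = (tmp, 0) := by
  cases f <;> simp [Getlist_data]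

lemma clusterLoop_sim (rev : PySem.Dict Int (List Int)) :
    ∀ (f : Nat) (l : Int) (ls : List Int) (rest : List (List Int)) (tmp : List Int),
      (∀ x ∈ rest, x ≠ ([] : List Int)) →
      clusterLoop f ((l :: ls) :: rest) rev tmp
        = clusterLoop (f - (Getlist_data f (l :: ls) rev tmp).2) rest rev
            (Getlist_data f (l :: ls) rev tmp).1 := by
  intro f
  induction f using Nat.strong_induction_on with
  | _ f IH =>
    intro l ls rest tmp hrest
    match f with
    | 0 =>
      simp [Getlist_data, clusterLoop_zero]
    | g + 1 =>
      rw [show clusterLoop (g+1) ((l :: ls) :: rest) rev tmp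
          = clusterLoop g (match rev.get? l with
              | some (k :: ks) => (k :: ks) :: (if ls.isEmpty then rest else ls :: rest)
              | _ => (if ls.isEmpty then rest else ls :: rest)) rev (tmp ++ [l]) from by
            simp [clusterLoop]]
      rw [show Getlist_data (g+1) (l :: ls) rev tmp
          = (let cr := if rev.contains l then Getlist_data g (rev.getD l []) rev (tmp ++ [l])
                       else (tmp ++ [l], 0)
             let sr := Getlist_data (g - cr.2) ls rev cr.1
             (sr.1, 1 + cr.2 + sr.2)) from by
            simp [Getlist_data]]
      rcases hg : rev.get? l with _ | kids
      · have hc : rev.contains l = false := by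
          rw [PySem.Dict.contains_eq_isSome_get?, hg]; rfl
        simp only [hc, Bool.false_eq_true, if_false]
        cases ls with
        | nil =>
          simp [Getlist_data_nil]
        | cons l2 ls2 =>
          simp only [List.isEmpty_cons, if_false, Bool.false_eq_true]
          rw [IH g (by omega) l2 ls2 rest (tmp ++ [l]) hrest]
          have : (g + 1 - (1 + 0 + (Getlist_data g (l2 :: ls2) rev (tmp ++ [l])).2))
               = g - (Getlist_data g (l2 :: ls2) rev (tmp ++ [l])).2 := by omega
          simp [this]
      · have hc : rev.contains l = true := by
          rw [PySem.Dict.contains_eq_isSome_get?, hg]; rfl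
        have hgd : rev.getD l [] = kids := by simp [PySem.Dict.getD, hg]
        simp only [hc, if_true, hgd]
        cases kids with
        | nil =>
          simp only [Getlist_data_nil]
          cases ls with
          | nil => simp [Getlist_data_nil]
          | cons l2 ls2 =>
            simp only [List.isEmpty_cons, if_false, Bool.false_eq_true]
            rw [IH g (by omega) l2 ls2 rest (tmp ++ [l]) hrest]
            have : (g + 1 - (1 + 0 + (Getlist_data g (l2 :: ls2) rev (tmp ++ [l])).2))
                 = g - (Getlist_data g (l2 :: ls2) rev (tmp ++ [l])).2 := by omega
            simp [this]
        | cons k ks =>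
          set cr := Getlist_data g (k :: ks) rev (tmp ++ [l]) with hcr
          cases ls with
          | nil =>
            simp only [List.isEmpty_nil, if_true]
            rw [IH g (by omega) k ks rest (tmp ++ [l]) hrest]
            simp only [← hcr, Getlist_data_nil]
            congr 1
            omega
          | cons l2 ls2 =>
            simp only [List.isEmpty_cons, if_false, Bool.false_eq_true]
            have hrest1 : ∀ x ∈ (l2 :: ls2) :: rest, x ≠ ([] : List Int) := by
              intro x hx
              rcases hx with _ | hx
              · simp
              · exact hrest x (by assumption)
            rw [IH g (by omega) k ks ((l2 :: ls2) :: rest) (tmp ++ [l]) hrest1]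
            rw [IH (g - cr.2) (by omega) l2 ls2 rest cr.1 hrest]
            set sr := Getlist_data (g - cr.2) (l2 :: ls2) rev cr.1 with hsr
            congr 1
            omega

lemma clusterLoop_nil (f : Nat) (rev : PySem.Dict Int (List Int)) (tmp : List Int) :
    clusterLoop f [] rev tmp = tmp := by
  cases f <;> simp [clusterLoop]

lemma collect_eq (rev : PySem.Dict Int (List Int)) (F : Nat) (key : Int) :
    (if rev.contains key then (Getlist_data F (rev.getD key []) rev [key]).1 else [key])
      = clusterLoop F (match rev.get? key with
          | some (k :: ks) => [k :: ks]
          | _ => []) rev [key] := by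
  rcases hg : rev.get? key with _ | kids
  · have hc : rev.contains key = false := by
      rw [PySem.Dict.contains_eq_isSome_get?, hg]; rfl
    simp [hc, clusterLoop_nil]
  · have hc : rev.contains key = true := by
      rw [PySem.Dict.contains_eq_isSome_get?, hg]; rfl
    have hgd : rev.getD key [] = kids := by simp [PySem.Dict.getD, hg]
    cases kids with
    | nil => simp [hc, hgd, Getlist_data_nil, clusterLoop_nil]
    | cons k ks =>
      simp only [hc, if_true, hgd]
      rw [clusterLoop_sim rev F k ks [] [key] (by simp), clusterLoop_nil]

-- The two pipelines agree on every input.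
theorem GetClusters_spec_aux (ary : List (Int × Int)) : GetClusters ary = GetClusters_alt ary := by
  dsimp only [GetClusters, GetClusters_alt]
  have hfwd : (ary.foldl (fun d t => d.insert t.1 t.2)
      (PySem.Dict.empty : PySem.Dict Int Int)) = PySem.Dict.ofList ary := rfl
  rw [hfwd]
  set fwd := PySem.Dict.ofList ary with hf
  -- rev dicts are built by pointwise-equal fold steps
  have hstep : (fun (r : PySem.Dict Int (List Int)) (kv : Int × Int) =>
      if r.contains kv.2 then r.modify kv.2 [] (fun l => l ++ [kv.1])
      else r.insert kv.2 [kv.1])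
      = fun r kv => r.modify kv.2 [] (fun l => l ++ [kv.1]) := by
    funext r kv
    by_cases h : r.contains kv.2
    · simp [h]
    · have h' : r.contains kv.2 = false := by simpa using h
      simp [h', PySem.Dict.modify, PySem.Dict.getD_of_not_contains r ([] : List Int) h']
  rw [hstep]
  set rev := fwd.items.foldl (fun r kv => r.modify kv.2 [] (fun l => l ++ [kv.1]))
    (PySem.Dict.empty : PySem.Dict Int (List Int)) with hr
  -- A's cl_lst is the filtered key list
  have hcl : rev.items.foldl (fun acc kv =>
        if fwd.contains kv.1 then acc else acc ++ [kv.1]) ([] : List Int)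
      = rev.keys.filter (fun k => !fwd.contains k) := by
    have h1 : rev.items.foldl (fun acc kv =>
          if fwd.contains kv.1 then acc else acc ++ [kv.1]) ([] : List Int)
        = rev.keys.foldl (fun acc k =>
          if fwd.contains k then acc else acc ++ [k]) ([] : List Int) := by
      rw [PySem.Dict.keys, List.foldl_map]
    rw [h1]
    have h2 : (fun (acc : List Int) (k : Int) => if fwd.contains k then acc else acc ++ [k])
        = fun acc k => if (!fwd.contains k) = true then acc ++ [k] else acc := by
      funext acc k
      cases h : fwd.contains k
      · simp
      · simp
    rw [h2, ← List.foldl_filter]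
    exact PySem.List.foldl_append_singleton ..
  rw [hcl]
  -- B's skip-if fold is the same filtered fold
  have h3 : rev.keys.foldl (fun o root =>
        if fwd.contains root then o
        else o.insert root (PySem.List.sorted (PySem.Set.ofList
          (clusterLoop (ary.length + 1) (match rev.get? root with
            | some (k :: ks) => [k :: ks]
            | _ => []) rev [root])) (fun x => x) false))
        (PySem.Dict.empty : PySem.Dict Int (List Int))
      = (rev.keys.filter (fun k => !fwd.contains k)).foldl (fun o root =>
          o.insert root (PySem.List.sorted (PySem.Set.ofList
          (clusterLoop (ary.length + 1) (match rev.get? root with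
            | some (k :: ks) => [k :: ks]
            | _ => []) rev [root])) (fun x => x) false))
        (PySem.Dict.empty : PySem.Dict Int (List Int)) := by
    rw [List.foldl_filter]
    congr 1
    funext o root
    cases h : fwd.contains root
    · simp
    · simp
  rw [h3]
  have h4 : (fun (fl : PySem.Dict Int (List Int)) (key : Int) =>
      fl.insert key (PySem.List.sorted (PySem.Set.ofList
        (if rev.contains key then (Getlist_data (ary.length + 1) (rev.getD key []) rev [key]).1
         else [key])) (fun x => x) false))
    = (fun (o : PySem.Dict Int (List Int)) (root : Int) =>
      o.insert root (PySem.List.sorted (PySem.Set.ofList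
        (clusterLoop (ary.length + 1) (match rev.get? root with
          | some (k :: ks) => [k :: ks]
          | _ => []) rev [root])) (fun x => x) false)) := by
    funext fl key
    rw [collect_eq rev (ary.length + 1) key]
  rw [h4]

-- ===== VERDICT (by name: the statement is the Claim_ definition above) =====
theorem GetClusters_spec : Claim_equal_GetClusters := by
  intro ary _
  unfold Spec_GetClusters
  exact GetClusters_spec_aux ary
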